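-- pv_equiv track=rewrite | github.com/mykespb/leetcoding | lc-minsumindex.py | solve
-- ===== SOURCE A (Python) =====
-- def solve(list1: list[str], list2: list[str]) -> list[str]:
--     """solve complete task"""
--
--     minindex = None
--     bestwords = []
--
--     for i1, w1 in enumerate(list1):
--         if w1 in list2:
--             sumind = i1 + list2.index(w1)
--             if minindex is None or sumind < minindex:
--                 minindex = sumind
--                 bestwords = [w1]
--             elif sumind == minindex:
--                 bestwords.append(w1)
--
--     return bestwords
-- ===== SOURCE B (Python) =====
-- def solve(list1: list[str], list2: list[str]) -> list[str]:
--     """solve complete task"""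
--     pos = {}
--     for i, w in enumerate(list2):
--         if w not in pos:
--             pos[w] = i
--     sums = [i + pos[w] for i, w in enumerate(list1) if w in pos]
--     if not sums:
--         return []
--     m = min(sums)
--     return [w for i, w in enumerate(list1) if w in pos and i + pos[w] == m]
-- ===== Notes on version B (the rewrite author's own statement) =====
-- stated objective: faster
-- what changed: B replaces A's single-pass running-minimum accumulator with per-word scans of list2 by a staged pipeline: build a word->first-index map of list2 once, compute all index sums, take their minimum, then collect the words attaining it.
import Mathlib
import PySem

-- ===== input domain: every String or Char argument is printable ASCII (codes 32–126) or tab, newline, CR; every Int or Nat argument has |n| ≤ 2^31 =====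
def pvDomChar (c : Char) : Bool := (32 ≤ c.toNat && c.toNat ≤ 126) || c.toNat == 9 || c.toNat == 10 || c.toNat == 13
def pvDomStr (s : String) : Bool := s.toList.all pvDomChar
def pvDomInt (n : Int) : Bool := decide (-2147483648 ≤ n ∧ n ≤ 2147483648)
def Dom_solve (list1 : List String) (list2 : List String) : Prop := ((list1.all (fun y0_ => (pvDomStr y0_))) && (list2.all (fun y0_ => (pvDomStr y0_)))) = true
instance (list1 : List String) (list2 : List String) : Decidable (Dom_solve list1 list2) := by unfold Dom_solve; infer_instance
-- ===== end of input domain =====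

-- B replaces A's single-pass running-minimum accumulator (with per-word scans of list2) by a staged
-- pipeline: map list2's words to their first index once, list all index sums, take min, collect the winners.

-- ===== PORT A =====
-- loop body of A's 'for i1, w1 in enumerate(list1)' with state (minindex, bestwords)
def stepA (list2 : List String) (st : Option Int × List String) (p : Int × String) :
    Option Int × List String :=
  if p.2 ∈ list2 then
    let sumind : Int := p.1 + (((PySem.List.index? list2 p.2).getD 0 : Nat) : Int)
    match st.1 with
    | none => (some sumind, [p.2])
    | some m =>
      if sumind < m then (some sumind, [p.2])
      else if sumind = m then (st.1, st.2 ++ [p.2])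
      else st
  else st

def solve (list1 : List String) (list2 : List String) : List String :=
  ((PySem.List.enumerate list1 0).foldl (stepA list2) (none, [])).2

-- ===== PORT B =====
-- pos = {}; for i, w in enumerate(list2): if w not in pos: pos[w] = i
def posDict (list2 : List String) : PySem.Dict String Int :=
  (PySem.List.enumerate list2 0).foldl
    (fun d p => if d.contains p.2 then d else d.insert p.2 p.1) PySem.Dict.empty

-- sums = [i + pos[w] for i, w in enumerate(list1) if w in pos]; if not sums: return [];
-- m = min(sums); return [w for i, w in enumerate(list1) if w in pos and i + pos[w] == m]
def solve_alt (list1 : List String) (list2 : List String) : List String :=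
  let pos := posDict list2
  let sums := (PySem.List.enumerate list1 0).filterMap
    (fun p => match pos.get? p.2 with | some j => some (p.1 + j) | none => none)
  match PySem.List.min? sums (fun x => x) with
  | none => []
  | some m =>
    (PySem.List.enumerate list1 0).filterMap
      (fun p => match pos.get? p.2 with
        | some j => if p.1 + j = m then some p.2 else none
        | none => none)

-- ===== PRECONDITION & SPEC =====
def Spec_solve (list1 : List String) (list2 : List String) (out : List String) : Prop := out = solve_alt list1 list2
instance (list1 : List String) (list2 : List String) (out : List String) : Decidable (Spec_solve list1 list2 out) := by unfold Spec_solve; infer_instance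

-- ===== CLAIM (what is proved, stated in full; the proofs are below) =====
def Claim_equal_solve : Prop := ∀ (list1 : List String) (list2 : List String), Dom_solve list1 list2 → Spec_solve list1 list2 (solve list1 list2)

-- ===== LEMMAS AND PROOFS =====

-- abstract "index sum of p, if p.2 occurs in list2" (A's sumind / B's i + pos[w])
def gA (list2 : List String) (p : Int × String) : Option Int :=
  if p.2 ∈ list2 then some (p.1 + (((PySem.List.index? list2 p.2).getD 0 : Nat) : Int)) else none

-- the winners filter at threshold m
def fFil (list2 : List String) (m : Int) (p : Int × String) : Option String :=
  match gA list2 p with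
  | some s => if s = m then some p.2 else none
  | none => none

-- the if-not-in-insert fold keeps the FIRST index of each word
lemma get?_posDict_fold (l : List String) (s : Int) (d : PySem.Dict String Int) (x : String) :
    ((PySem.List.enumerate l s).foldl
        (fun d p => if d.contains p.2 then d else d.insert p.2 p.1) d).get? x =
      if d.contains x then d.get? x
      else Option.map (fun k : Nat => s + (k : Int)) (PySem.List.index? l x) := by
  induction l generalizing s d with
  | nil =>
    rw [PySem.List.enumerate_nil, List.foldl_nil,
      (PySem.List.index?_eq_none_iff _ _).mpr (List.not_mem_nil)]
    by_cases h : d.contains x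
    · rw [if_pos h]
    · rw [if_neg h, (PySem.Dict.get?_eq_none_iff_contains _ _).mpr
        (by simp at h; exact h), Option.map_none]
  | cons w l ih =>
    rw [PySem.List.enumerate_cons, List.foldl_cons]
    by_cases hc : d.contains w
    · simp only [if_pos hc]
      rw [ih]
      by_cases hxw : x = w
      · subst hxw; rw [if_pos hc, if_pos hc]
      · have hne : w ≠ x := fun h => hxw h.symm
        rw [PySem.List.index?_cons_of_ne _ hne]
        by_cases hcx : d.contains x
        · rw [if_pos hcx, if_pos hcx]
        · rw [if_neg hcx, if_neg hcx]
          cases hix : PySem.List.index? l x with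
          | none => simp
          | some k => simp; ring
    · simp only [if_neg hc]
      rw [ih]
      by_cases hxw : x = w
      · subst hxw
        rw [if_pos (PySem.Dict.contains_insert_self _ _ _), if_neg hc,
          PySem.Dict.get?_insert_self, PySem.List.index?_cons_self, Option.map_some]
        simp
      · have hne : w ≠ x := fun h => hxw h.symm
        have hcx' : (d.insert w s).contains x = d.contains x := by
          rw [PySem.Dict.contains_insert]; simp [hxw]
        rw [hcx', PySem.List.index?_cons_of_ne _ hne]
        by_cases hcx : d.contains x
        · rw [if_pos hcx, if_pos hcx, PySem.Dict.get?_insert_of_ne _ _ hxw]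
        · rw [if_neg hcx, if_neg hcx]
          cases hix : PySem.List.index? l x with
          | none => simp
          | some k => simp; ring

lemma get?_posDict (list2 : List String) (x : String) :
    (posDict list2).get? x = (PySem.List.index? list2 x).map (fun k : Nat => (k : Int)) := by
  unfold posDict
  rw [get?_posDict_fold]
  simp

-- B's "w in pos -> i + pos[w]" IS gA
lemma sum_fun_eq (list2 : List String) :
    (fun p : Int × String =>
        match (posDict list2).get? p.2 with | some j => some (p.1 + j) | none => none)
      = gA list2 := by
  funext p
  rw [get?_posDict]
  unfold gA
  by_cases h : p.2 ∈ list2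
  · obtain ⟨k, hk⟩ := Option.isSome_iff_exists.mp ((PySem.List.index?_isSome_iff _ _).mpr h)
    rw [if_pos h, hk, Option.map_some]
    rfl
  · rw [(PySem.List.index?_eq_none_iff _ _).mpr h, Option.map_none, if_neg h]

-- B's winners filter IS fFil
lemma fil_fun_eq (list2 : List String) (m : Int) :
    (fun p : Int × String =>
        match (posDict list2).get? p.2 with
        | some j => if p.1 + j = m then some p.2 else none
        | none => none)
      = fFil list2 m := by
  funext p
  unfold fFil gA
  rw [get?_posDict]
  by_cases h : p.2 ∈ list2
  · obtain ⟨k, hk⟩ := Option.isSome_iff_exists.mp ((PySem.List.index?_isSome_iff _ _).mpr h)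
    rw [if_pos h, hk, Option.map_some]
    rfl
  · rw [(PySem.List.index?_eq_none_iff _ _).mpr h, Option.map_none, if_neg h]

lemma min?_append_singleton (l : List Int) (a : Int) :
    (l ++ [a]).min? = some (match l.min? with | none => a | some m => min m a) := by
  cases l with
  | nil => simp [List.min?]
  | cons x t => simp [List.min?, List.foldl_append]

-- characterization of A's loop: running minimum + winners so far = staged form
lemma foldA_inv (list2 : List String) (ps : List (Int × String)) :
    ps.foldl (stepA list2) (none, []) =
      match (ps.filterMap (gA list2)).min? with
      | none => (none, [])
      | some m => (some m, ps.filterMap (fFil list2 m)) := by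
  induction ps using List.reverseRecOn with
  | nil => rfl
  | append_singleton ps p ih =>
    rw [List.foldl_append, List.foldl_cons, List.foldl_nil, ih]
    cases hg : gA list2 p with
    | none =>
      have hmem : p.2 ∉ list2 := by
        intro h; simp [gA, h] at hg
      have h1 : List.filterMap (gA list2) (ps ++ [p]) = List.filterMap (gA list2) ps := by
        simp [hg]
      have h2 : ∀ m, List.filterMap (fFil list2 m) (ps ++ [p])
          = List.filterMap (fFil list2 m) ps := by
        intro m; simp [fFil, hg]
      rw [h1]
      cases hM : (ps.filterMap (gA list2)).min? with
      | none => simp [stepA, hmem]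
      | some m => simp [stepA, hmem, h2 m]
    | some s =>
      have hmem : p.2 ∈ list2 := by
        by_contra h; simp [gA, h] at hg
      have hs : p.1 + (((PySem.List.index? list2 p.2).getD 0 : Nat) : Int) = s := by
        simpa [gA, hmem, -PySem.List.index?_eq_idxOf?] using hg
      have hs' : p.1 + (((List.idxOf? p.2 list2).getD 0 : Nat) : Int) = s := by
        rw [← PySem.List.index?_eq_idxOf?]; exact hs
      have h1 : List.filterMap (gA list2) (ps ++ [p]) = List.filterMap (gA list2) ps ++ [s] := by
        simp [hg]
      have hsome : ∀ m, List.filterMap (fFil list2 m) (ps ++ [p])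
          = List.filterMap (fFil list2 m) ps
              ++ (if s = m then [p.2] else []) := by
        intro m
        by_cases hsm : s = m <;> simp [fFil, hg, hsm]
      rw [h1, min?_append_singleton]
      cases hM : (ps.filterMap (gA list2)).min? with
      | none =>
        have hnil : ps.filterMap (gA list2) = [] := List.min?_eq_none_iff.mp hM
        have hfil : ps.filterMap (fFil list2 s) = [] := by
          rw [List.filterMap_eq_nil_iff]
          intro q hq
          have hgq : gA list2 q = none := by
            cases hgq : gA list2 q with
            | none => rfl
            | some t =>
              exfalso
              have : t ∈ ps.filterMap (gA list2) := List.mem_filterMap.mpr ⟨q, hq, hgq⟩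
              rw [hnil] at this; exact List.not_mem_nil this
          unfold fFil; rw [hgq]
        simp [stepA, hmem, hs', hsome s, hfil]
      | some m =>
        have hge : ∀ x ∈ ps.filterMap (gA list2), m ≤ x :=
          (List.min?_eq_some_iff.mp hM).2
        rcases lt_trichotomy s m with hlt | heq | hgt
        · -- new strict minimum
          have hmin : min m s = s := by omega
          have hfil : ps.filterMap (fFil list2 s) = [] := by
            rw [List.filterMap_eq_nil_iff]
            intro q hq
            unfold fFil
            cases hgq : gA list2 q with
            | none => rfl
            | some t =>
              have ht : m ≤ t := hge t (List.mem_filterMap.mpr ⟨q, hq, hgq⟩)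
              have : ¬ (t = s) := by omega
              simp [this]
          simp [stepA, hmem, hs', hlt, hmin, hsome s, hfil]
        · -- tie: append the new winner
          subst heq
          simp [stepA, hmem, hs', hsome s]
        · -- worse than the minimum: state unchanged, p filtered out
          have hmin : min m s = m := by omega
          have hne : s ≠ m := by omega
          have hnl : ¬ s < m := by omega
          simp [stepA, hmem, hs', hmin, hsome m, hne, hnl]

-- B's min over Int with the identity key is List.min?
lemma pymin_id_eq (l : List Int) : PySem.List.min? l (fun x => x) = l.min? := by
  cases l with
  | nil => rfl
  | cons x t => rw [PySem.List.min?_id_cons]; rfl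

-- ===== VERDICT (by name: the statement is the Claim_ definition above) =====
theorem solve_spec : Claim_equal_solve := by
  intro list1 list2 _
  unfold Spec_solve solve solve_alt
  rw [foldA_inv]
  simp only [sum_fun_eq, pymin_id_eq, fil_fun_eq]
  cases hM : ((PySem.List.enumerate list1 0).filterMap (gA list2)).min? <;> rfl
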